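-- pv_equiv track=rewrite | github.com/Turf1013/PPC_AutoTool | inf/compress_ppc.py | mergeAssign
-- ===== SOURCE A (Python) =====
-- def mergeAssign(lines, assigns):
-- 	n = len(lines)
-- 	i = 0
-- 	ret = []
-- 	while i < n:
-- 		line = lines[i].lstrip()
-- 		if line.startswith("// Ctrl Signal"):
-- 			ret = lines[:i] + assigns + ["\n\n"] + lines[i:]
-- 			break
-- 		i += 1
-- 	if not ret:
-- 		ret = lines + assigns
-- 	return ret
-- ===== SOURCE B (Python) =====
-- def mergeAssign(lines, assigns):
-- 	ret = []
-- 	inserted = False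
-- 	for line in lines:
-- 		if not inserted and line.lstrip().startswith("// Ctrl Signal"):
-- 			ret = ret + assigns + ["\n\n"]
-- 			inserted = True
-- 		ret.append(line)
-- 	if not inserted:
-- 		ret = ret + assigns
-- 	return ret
-- ===== Notes on version B (the rewrite author's own statement) =====
-- stated objective: simpler
-- what changed: Replaces the indexed while-loop with slicing (lines[:i]+assigns+...+lines[i:]) and the empty-ret sentinel by a single forward streaming pass over the lines with an inserted flag, appending as it goes.
import Mathlib
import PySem

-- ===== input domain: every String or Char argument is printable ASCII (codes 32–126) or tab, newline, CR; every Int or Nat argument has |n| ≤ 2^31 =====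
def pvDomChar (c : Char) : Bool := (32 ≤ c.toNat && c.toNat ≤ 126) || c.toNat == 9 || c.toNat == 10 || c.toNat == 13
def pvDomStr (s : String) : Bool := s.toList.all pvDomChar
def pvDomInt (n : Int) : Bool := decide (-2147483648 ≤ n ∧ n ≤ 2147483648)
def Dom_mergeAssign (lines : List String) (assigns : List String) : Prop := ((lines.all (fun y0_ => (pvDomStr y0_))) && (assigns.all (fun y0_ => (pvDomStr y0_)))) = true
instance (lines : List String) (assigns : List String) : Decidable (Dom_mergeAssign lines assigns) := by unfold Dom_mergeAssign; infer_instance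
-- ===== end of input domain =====

-- B replaces A's indexed while-loop + slicing + empty-ret sentinel by a single
-- streaming pass with an `inserted` flag (objective: simpler decomposition).


-- ===== PORT A =====
-- the while-loop: scans indices i upward, breaks with the sliced result at the
-- first marker line, leaves ret = [] if none is found
def mergeAssignLoop (lines : List String) (assigns : List String) (i : Nat) : List String :=
  if h : i < lines.length then
    let line := PySem.Str.lstrip lines[i]
    if PySem.Str.startswith line "// Ctrl Signal" then
      PySem.List.slice lines none (some (i : Int)) ++ assigns ++ ["\n\n"] ++
        PySem.List.slice lines (some (i : Int)) none
    else
      mergeAssignLoop lines assigns (i + 1)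
  else
    []
termination_by lines.length - i

def mergeAssign (lines : List String) (assigns : List String) : List String :=
  let ret := mergeAssignLoop lines assigns 0
  if ret = [] then lines ++ assigns else ret

-- ===== PORT B =====
-- one step of B's for-loop: state is (ret, inserted)
def mergeAssignStep (assigns : List String) (acc : List String × Bool) (line : String) :
    List String × Bool :=
  if !acc.2 && PySem.Str.startswith (PySem.Str.lstrip line) "// Ctrl Signal" then
    (acc.1 ++ assigns ++ ["\n\n"] ++ [line], true)
  else
    (acc.1 ++ [line], acc.2)

def mergeAssign_alt (lines : List String) (assigns : List String) : List String :=
  let p := lines.foldl (mergeAssignStep assigns) ([], false)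
  if p.2 then p.1 else p.1 ++ assigns

-- ===== PRECONDITION & SPEC =====
def Spec_mergeAssign (lines : List String) (assigns : List String) (out : List String) : Prop := out = mergeAssign_alt lines assigns
instance (lines : List String) (assigns : List String) (out : List String) : Decidable (Spec_mergeAssign lines assigns out) := by unfold Spec_mergeAssign; infer_instance

-- ===== CLAIM (what is proved, stated in full; the proofs are below) =====
def Claim_equal_mergeAssign : Prop := ∀ (lines : List String) (assigns : List String), Dom_mergeAssign lines assigns → Spec_mergeAssign lines assigns (mergeAssign lines assigns)

-- ===== LEMMAS AND PROOFS =====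

-- once inserted, B's loop just appends the remaining lines
theorem foldl_step_true (assigns : List String) (rest : List String) :
    ∀ acc : List String, rest.foldl (mergeAssignStep assigns) (acc, true) = (acc ++ rest, true) := by
  induction rest with
  | nil => simp
  | cons x xs ih =>
    intro acc
    simp [List.foldl_cons, mergeAssignStep, ih]

-- main invariant: A's loop-then-sentinel from index i equals B's fold over the
-- remaining suffix started from (lines.take i, false)
set_option maxRecDepth 8192 in
theorem loop_eq_fold (lines assigns : List String) :
    ∀ (k i : Nat), i ≤ lines.length → lines.length - i = k →
      (if mergeAssignLoop lines assigns i = [] then lines ++ assigns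
       else mergeAssignLoop lines assigns i)
      = (let p := (lines.drop i).foldl (mergeAssignStep assigns) (lines.take i, false)
         if p.2 then p.1 else p.1 ++ assigns) := by
  intro k
  induction k with
  | zero =>
    intro i hle hk
    have hi : i = lines.length := by omega
    subst hi
    simp [mergeAssignLoop]
  | succ k ih =>
    intro i hle hk
    have hlt : i < lines.length := by omega
    have hdrop : lines.drop i = lines[i] :: lines.drop (i + 1) :=
      List.drop_eq_getElem_cons hlt
    by_cases hm : PySem.Str.startswith (PySem.Str.lstrip lines[i]) "// Ctrl Signal" = true
    · have hA : mergeAssignLoop lines assigns i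
          = lines.take i ++ assigns ++ ["\n\n"] ++ lines.drop i := by
        rw [mergeAssignLoop]
        simp only [hlt, dif_pos, hm, if_true]
        rw [PySem.List.slice_to_natCast, PySem.List.slice_from_natCast]
      have hstep : mergeAssignStep assigns (lines.take i, false) lines[i]
          = (lines.take i ++ assigns ++ ["\n\n"] ++ [lines[i]], true) := by
        simp only [mergeAssignStep, hm, Bool.not_false, Bool.true_and, if_true]
      rw [hA, if_neg (by simp)]
      rw [hdrop, List.foldl_cons, hstep, foldl_step_true]
      simp
    · simp only [Bool.not_eq_true] at hm
      have hA : mergeAssignLoop lines assigns i = mergeAssignLoop lines assigns (i + 1) := by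
        rw [mergeAssignLoop]
        simp only [hlt, dif_pos, hm, Bool.false_eq_true, if_false]
      have htake : lines.take i ++ [lines[i]] = lines.take (i + 1) := by
        rw [List.take_add_one]
        simp [List.getElem?_eq_getElem hlt]
      have hstep : mergeAssignStep assigns (lines.take i, false) lines[i]
          = (lines.take (i + 1), false) := by
        simp only [mergeAssignStep, hm, Bool.not_false, Bool.true_and, if_false,
          Bool.false_eq_true]
        rw [htake]
      rw [hA, hdrop, List.foldl_cons, hstep]
      exact ih (i + 1) (by omega) (by omega)

-- ===== VERDICT (by name: the statement is the Claim_ definition above) =====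
theorem mergeAssign_spec : Claim_equal_mergeAssign := by
  intro lines assigns _
  unfold Spec_mergeAssign mergeAssign mergeAssign_alt
  simpa using loop_eq_fold lines assigns lines.length 0 (by omega) (by omega)
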